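-- pv_equiv track=rewrite | github.com/dmbriner/calendar-optimizer | notion_tasks.py | _find_checkbox_property
-- ===== SOURCE A (Python) =====
-- def _find_checkbox_property(properties: dict) -> str | None:
--     for name, config in properties.items():
--         if config["type"] == "checkbox" and any(kw in name.lower() for kw in {"done", "complete", "finished", "checked"}):
--             return name
--     # any checkbox
--     for name, config in properties.items():
--         if config["type"] == "checkbox":
--             return name
--     return None
-- ===== SOURCE B (Python) =====
-- def _find_checkbox_property(properties: dict) -> str | None:
--     fallback = None
--     for name, config in properties.items():
--         if config["type"] == "checkbox":
--             if any(kw in name.lower() for kw in ("done", "complete", "finished", "checked")):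
--                 return name
--             if fallback is None:
--                 fallback = name
--     return fallback
-- ===== Notes on version B (the rewrite author's own statement) =====
-- stated objective: simpler
-- what changed: The two sequential scans (keyword-named checkbox, then any checkbox) are merged into one pass that maintains a `fallback` accumulator holding the first checkbox seen.
import Mathlib
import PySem

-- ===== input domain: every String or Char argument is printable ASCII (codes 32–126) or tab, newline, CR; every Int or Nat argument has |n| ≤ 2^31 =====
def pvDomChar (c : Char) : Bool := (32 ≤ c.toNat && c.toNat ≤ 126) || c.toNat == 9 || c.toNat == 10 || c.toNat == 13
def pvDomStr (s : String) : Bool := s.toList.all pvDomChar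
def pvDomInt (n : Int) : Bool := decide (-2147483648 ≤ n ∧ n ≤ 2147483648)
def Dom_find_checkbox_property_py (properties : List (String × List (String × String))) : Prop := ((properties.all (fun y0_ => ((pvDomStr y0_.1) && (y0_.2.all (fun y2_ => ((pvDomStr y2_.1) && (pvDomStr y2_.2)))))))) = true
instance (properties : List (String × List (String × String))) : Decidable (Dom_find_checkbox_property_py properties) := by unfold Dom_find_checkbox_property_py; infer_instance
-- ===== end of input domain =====

-- B merges A's two sequential scans into one pass with a `fallback` accumulator (objective: simpler).

-- Shared primitives of both ports (same helper role as in the Pythons):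
-- dict lookup config.get("type") on the assoc list (first match, per the dict convention)
def pvGetType? : List (String × String) → Option String
  | [] => none
  | (k, v) :: rest => if k == "type" then some v else pvGetType? rest
-- config["type"] — exact under Pre_ (which excludes the KeyError inputs, where both Pythons raise)
def pvCfgType (c : List (String × String)) : String := (pvGetType? c).getD ""
-- any(kw in name.lower() for kw in {...}) — `any` over a set literal is order-independent (it is a disjunction), ported as `||`
def pvKwMatch (name : String) : Bool :=
  PySem.Str.isIn "done" (PySem.Str.lower name) || PySem.Str.isIn "complete" (PySem.Str.lower name) ||
  PySem.Str.isIn "finished" (PySem.Str.lower name) || PySem.Str.isIn "checked" (PySem.Str.lower name)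

-- ===== PORT A =====
-- first loop: first keyword-named checkbox
def fcpLoop1 : List (String × List (String × String)) → Option String
  | [] => none
  | (name, config) :: rest =>
    if pvCfgType config == "checkbox" && pvKwMatch name then some name else fcpLoop1 rest

-- second loop: any checkbox
def fcpLoop2 : List (String × List (String × String)) → Option String
  | [] => none
  | (name, config) :: rest =>
    if pvCfgType config == "checkbox" then some name else fcpLoop2 rest

def find_checkbox_property_py (properties : List (String × List (String × String))) : Option String :=
  match fcpLoop1 properties with
  | some name => some name
  | none => fcpLoop2 properties

-- ===== PORT B =====
-- single pass carrying the fallback accumulator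
def fcpAltGo : List (String × List (String × String)) → Option String → Option String
  | [], fallback => fallback
  | (name, config) :: rest, fallback =>
    if pvCfgType config == "checkbox" then
      if pvKwMatch name then some name
      else fcpAltGo rest (if fallback.isNone then some name else fallback)
    else fcpAltGo rest fallback

def find_checkbox_property_py_alt (properties : List (String × List (String × String))) : Option String :=
  fcpAltGo properties none

-- ===== PRECONDITION & SPEC =====
-- Pre_ excludes exactly the inputs where Python A raises KeyError: some config lacks the
-- "type" key and no keyword-named checkbox precedes it (B raises there too).
def Pre_find_checkbox_property_py (properties : List (String × List (String × String))) : Prop :=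
  ∀ i < properties.length,
    "type" ∉ ((properties.getD i ("", [])).2.map Prod.fst) →
    ∃ j < i, ((properties.getD j ("", [])).2.lookup "type" = some "checkbox"
              ∧ pvKwMatch (properties.getD j ("", [])).1 = true)
instance (properties : List (String × List (String × String))) : Decidable (Pre_find_checkbox_property_py properties) := by unfold Pre_find_checkbox_property_py; infer_instance

def pvWitness_find_checkbox_property_py : (List (String × List (String × String))) :=
  [("Done", [("type", "checkbox")]), ("Other", [("type", "text")])]

def Spec_find_checkbox_property_py (properties : List (String × List (String × String))) (out : Option String) : Prop := out = find_checkbox_property_py_alt properties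
instance (properties : List (String × List (String × String))) (out : Option String) : Decidable (Spec_find_checkbox_property_py properties out) := by unfold Spec_find_checkbox_property_py; infer_instance

-- ===== CLAIM (what is proved, stated in full; the proofs are below) =====
def Claim_equal_find_checkbox_property_py : Prop := ∀ (properties : List (String × List (String × String))), Dom_find_checkbox_property_py properties → Pre_find_checkbox_property_py properties → Spec_find_checkbox_property_py properties (find_checkbox_property_py properties)

-- ===== LEMMAS AND PROOFS =====
-- Invariant of B's single pass: it equals loop1, or else the fallback, or else loop2.
theorem fcpAltGo_eq (l : List (String × List (String × String))) (fb : Option String) :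
    fcpAltGo l fb =
      match fcpLoop1 l with
      | some n => some n
      | none => match fb with
                | some f => some f
                | none => fcpLoop2 l := by
  induction l generalizing fb with
  | nil => cases fb <;> rfl
  | cons hd rest ih =>
    obtain ⟨name, config⟩ := hd
    by_cases hc : (pvCfgType config == "checkbox") = true
    · by_cases hk : pvKwMatch name = true
      · simp [fcpAltGo, fcpLoop1, hc, hk]
      · simp only [fcpAltGo, fcpLoop1, fcpLoop2, hc, hk, Bool.and_eq_true, and_false,
          if_false, Bool.false_eq_true, if_pos]
        rw [ih]
        cases fb <;> simp
    · simp only [fcpAltGo, fcpLoop1, fcpLoop2, hc, Bool.and_eq_true, false_and,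
        Bool.false_eq_true, if_false]
      exact ih fb

-- ===== VERDICT (by name: the statement is the Claim_ definition above) =====
theorem find_checkbox_property_py_spec : Claim_equal_find_checkbox_property_py := by
  intro properties _ _
  unfold Spec_find_checkbox_property_py find_checkbox_property_py find_checkbox_property_py_alt
  rw [fcpAltGo_eq]
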